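-- pv_equiv track=rewrite | github.com/jordwalke/rehp | rehack_tests/switch_continue/switch_continue.py | g0
-- ===== SOURCE A (Python) =====
-- def g0(i):
--     i__0 = i
--     while True:
--         if 0 is i__0:
--             return 10
--         if 10 < i__0:
--             i__1 = int(i__0 + -5)
--             i__0 = i__1
--             continue
--         i__2 = int(i__0 + -1)
--         i__0 = i__2
--         continue
-- ===== SOURCE B (Python) =====
-- def g0(i):
--     # Closed form: the loop always drains i down to 0 (for i >= 0) and returns 10.
--     return 10
-- ===== Notes on version B (the rewrite author's own statement) =====
-- stated objective: faster
-- what changed: Replaced the decrement loop (subtract 5 while >10, else subtract 1, return 10 at 0) by the constant closed form 10, since the loop's return value never depends on i.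
import Mathlib
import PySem

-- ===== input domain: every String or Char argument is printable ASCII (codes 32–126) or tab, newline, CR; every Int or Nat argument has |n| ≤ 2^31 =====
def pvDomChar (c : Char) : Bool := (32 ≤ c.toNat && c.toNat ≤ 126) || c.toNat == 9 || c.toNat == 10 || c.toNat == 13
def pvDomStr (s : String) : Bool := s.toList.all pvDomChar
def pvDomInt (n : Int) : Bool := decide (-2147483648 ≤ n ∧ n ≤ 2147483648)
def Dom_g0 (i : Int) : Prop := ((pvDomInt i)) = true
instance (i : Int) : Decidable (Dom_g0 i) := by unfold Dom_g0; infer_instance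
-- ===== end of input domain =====

-- B replaces A's decrement loop by its closed form (always 10); for i < 0 A loops forever, so those inputs are outside Pre_.

-- ===== PORT A =====
-- A's 'while True' loop, fuel-bounded: each iteration either returns 10 at 0,
-- subtracts 5 when i__0 > 10, or subtracts 1. Fuel i.toNat + 1 suffices for i ≥ 0 (each step decreases i__0 by ≥ 1).
def g0Loop : Nat → Int → Int
  | 0, _ => 0  -- fuel exhausted (unreachable under Pre_)
  | fuel + 1, i0 =>
    if 0 = i0 then 10
    else if 10 < i0 then g0Loop fuel (i0 + -5)
    else g0Loop fuel (i0 + -1)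

def g0 (i : Int) : Int := g0Loop (i.toNat + 1) i

-- ===== PORT B =====
def g0_alt (i : Int) : Int := 10

-- ===== PRECONDITION & SPEC =====
-- A's loop never terminates for i < 0 (it decrements forever), so Pre_ admits exactly the inputs where A returns.
def Pre_g0 (i : Int) : Prop := 0 ≤ i
instance (i : Int) : Decidable (Pre_g0 i) := by unfold Pre_g0; infer_instance
def pvWitness_g0 : Int := 7

def Spec_g0 (i : Int) (out : Int) : Prop := out = g0_alt i
instance (i : Int) (out : Int) : Decidable (Spec_g0 i out) := by unfold Spec_g0; infer_instance

-- ===== CLAIM (what is proved, stated in full; the proofs are below) =====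
def Claim_equal_g0 : Prop := ∀ (i : Int), Dom_g0 i → Pre_g0 i → Spec_g0 i (g0 i)

-- ===== LEMMAS AND PROOFS =====
theorem g0Loop_eq_ten : ∀ (fuel : Nat) (i0 : Int), 0 ≤ i0 → i0.toNat < fuel → g0Loop fuel i0 = 10 := by
  intro fuel
  induction fuel with
  | zero => intro i0 _ h; omega
  | succ f ih =>
    intro i0 h0 hf
    simp only [g0Loop]
    split
    · rfl
    · rename_i hne
      split
      · rename_i hgt
        exact ih (i0 + -5) (by omega) (by omega)
      · rename_i hle
        exact ih (i0 + -1) (by omega) (by omega)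

-- ===== VERDICT (by name: the statement is the Claim_ definition above) =====
theorem g0_spec : Claim_equal_g0 := by
  intro i _ hpre
  unfold Spec_g0 g0 g0_alt
  exact g0Loop_eq_ten (i.toNat + 1) i hpre (by omega)
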